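-- pv_equiv track=rewrite | github.com/nitvishn/ProjectEuler | p357.py | constructFactors
-- ===== SOURCE A (Python) =====
-- import itertools
--
-- def constructFactors(n, prime_factors):
--     factors = {1, }
--     for k in range(1, len(prime_factors) + 1):
--         for combo in itertools.combinations(prime_factors, k):
--             acc = 1
--             for m in combo:
--                 acc *= m
--             factors.add(acc)
--     return factors
-- ===== SOURCE B (Python) =====
-- def constructFactors(n, prime_factors):
--     factors = {1}
--     m = len(prime_factors)
--     layer = [(1, -1)]
--     for _ in range(m):
--         nxt = []
--         for acc, i in layer:
--             for j in range(i + 1, m):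
--                 p = acc * prime_factors[j]
--                 factors.add(p)
--                 nxt.append((p, j))
--         layer = nxt
--     return factors
-- ===== Notes on version B (the rewrite author's own statement) =====
-- stated objective: alternative
-- what changed: Replaces itertools.combinations with a full product recomputation per subset by a layered dynamic programme that keeps each layer's (product, last index) pairs and extends every product by one later prime, so each subset product costs one multiplication instead of k.
import Mathlib
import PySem

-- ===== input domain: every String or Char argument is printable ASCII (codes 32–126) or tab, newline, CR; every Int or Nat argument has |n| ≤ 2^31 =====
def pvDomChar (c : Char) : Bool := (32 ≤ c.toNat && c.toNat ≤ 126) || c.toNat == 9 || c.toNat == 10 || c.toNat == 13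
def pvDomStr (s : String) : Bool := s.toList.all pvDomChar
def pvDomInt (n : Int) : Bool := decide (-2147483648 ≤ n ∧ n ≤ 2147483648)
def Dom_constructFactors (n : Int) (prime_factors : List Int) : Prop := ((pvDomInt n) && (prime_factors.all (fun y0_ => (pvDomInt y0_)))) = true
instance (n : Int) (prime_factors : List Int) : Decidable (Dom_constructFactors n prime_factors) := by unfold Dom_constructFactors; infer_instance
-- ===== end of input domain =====

-- B replaces A's per-subset product recomputation (itertools.combinations + inner loop) by a
-- layered dynamic programme that extends each already-built product by one later prime
-- (objective: alternative — fewer multiplications per subset, same overall cost).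

-- ===== PORT A =====
-- hand-port of itertools.combinations(xs, k) over a list: lexicographic by position (exact)
def pvCombos : List Int → Nat → List (List Int)
  | _, 0 => [[]]
  | [], _ + 1 => []
  | x :: t, k + 1 => ((pvCombos t k).map (fun c => x :: c)) ++ pvCombos t (k + 1)

def constructFactors (n : Int) (prime_factors : List Int) : List Int :=
  (PySem.List.pyRange 1 (PySem.List.len prime_factors + 1) 1).foldl
    (fun factors k =>
      (pvCombos prime_factors k.toNat).foldl
        (fun factors combo =>
          PySem.Set.add factors (combo.foldl (fun acc m => acc * m) 1))
        factors)
    (PySem.Set.ofList [1])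

-- ===== PORT B =====
def constructFactors_alt (n : Int) (prime_factors : List Int) : List Int :=
  let m : Int := PySem.List.len prime_factors
  ((PySem.List.pyRange 0 m 1).foldl
      (fun (st : List Int × List (Int × Int)) _ =>
        st.2.foldl
          (fun (st2 : List Int × List (Int × Int)) e =>
            (PySem.List.pyRange (e.2 + 1) m 1).foldl
              (fun (st3 : List Int × List (Int × Int)) j =>
                let p := e.1 * PySem.List.pyGetD prime_factors j 0
                (PySem.Set.add st3.1 p, st3.2 ++ [(p, j)]))
              st2)
          (st.1, ([] : List (Int × Int))))
      (PySem.Set.ofList [1], [((1 : Int), (-1 : Int))])).1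

-- ===== PRECONDITION & SPEC =====
def Spec_constructFactors (n : Int) (prime_factors : List Int) (out : List Int) : Prop := out = constructFactors_alt n prime_factors
instance (n : Int) (prime_factors : List Int) (out : List Int) : Decidable (Spec_constructFactors n prime_factors out) := by unfold Spec_constructFactors; infer_instance

-- ===== CLAIM (what is proved, stated in full; the proofs are below) =====
def Claim_equal_constructFactors : Prop := ∀ (n : Int) (prime_factors : List Int), Dom_constructFactors n prime_factors → Spec_constructFactors n prime_factors (constructFactors n prime_factors)

-- ===== LEMMAS AND PROOFS =====

-- product of a combination, exactly A's inner accumulator loop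
def pvProd (c : List Int) : Int := c.foldl (fun acc m => acc * m) 1

-- all ways to pick one element together with the remainder after it
def pvPicks : List Int → List (Int × List Int)
  | [] => []
  | x :: t => (x, t) :: pvPicks t

-- combinations paired with the remainder of the list after the last chosen element
def pvCombosR : List Int → Nat → List (List Int × List Int)
  | s, 0 => [([], s)]
  | [], _ + 1 => []
  | x :: t, k + 1 => ((pvCombosR t k).map (fun cr => (x :: cr.1, cr.2))) ++ pvCombosR t (k + 1)

-- B's extension of one layer entry (product, last index)
def pvExt (pf : List Int) (e : Int × Int) : List (Int × Int) :=
  (PySem.List.pyRange (e.2 + 1) (PySem.List.len pf) 1).map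
    (fun j => (e.1 * PySem.List.pyGetD pf j 0, j))

-- B's successive layers
def pvSL (pf : List Int) : Nat → List (Int × Int)
  | 0 => [(1, -1)]
  | k + 1 => (pvSL pf k).flatMap (pvExt pf)

def pvToEnt (pf : List Int) (cr : List Int × List Int) : Int × Int :=
  (pvProd cr.1, (pf.length : Int) - cr.2.length - 1)

-- B's one outer-loop step
def pvStepB (pf : List Int) (st : List Int × List (Int × Int)) : List Int × List (Int × Int) :=
  st.2.foldl
    (fun (st2 : List Int × List (Int × Int)) e =>
      (PySem.List.pyRange (e.2 + 1) (PySem.List.len pf) 1).foldl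
        (fun (st3 : List Int × List (Int × Int)) j =>
          (PySem.Set.add st3.1 (e.1 * PySem.List.pyGetD pf j 0),
           st3.2 ++ [(e.1 * PySem.List.pyGetD pf j 0, j)]))
        st2)
    (st.1, ([] : List (Int × Int)))

theorem pvCombosR_fst (s : List Int) : ∀ k, (pvCombosR s k).map Prod.fst = pvCombos s k := by
  induction s with
  | nil => intro k; cases k <;> simp [pvCombosR, pvCombos]
  | cons x t ih =>
    intro k
    cases k with
    | zero => simp [pvCombosR, pvCombos]
    | succ k' => simp [pvCombosR, pvCombos, ← ih, List.map_map, Function.comp_def]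

theorem pvCombosR_succ (s : List Int) : ∀ k, pvCombosR s (k + 1)
    = (pvCombosR s k).flatMap
        (fun cr => (pvPicks cr.2).map (fun xt => (cr.1 ++ [xt.1], xt.2))) := by
  induction s with
  | nil => intro k; cases k <;> simp [pvCombosR, pvPicks]
  | cons x t ih =>
    intro k
    cases k with
    | zero => simp [pvCombosR, pvPicks, ih 0, List.map_map, Function.comp_def]
    | succ k' =>
      simp only [pvCombosR, List.flatMap_append, List.flatMap_map]
      rw [ih (k' + 1), ih k']
      simp [List.map_flatMap, List.map_map, Function.comp_def]
theorem pvCombosR_suffix (s : List Int) : ∀ k cr, cr ∈ pvCombosR s k → cr.2 <:+ s := by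
  induction s with
  | nil => intro k cr h; cases k <;> simp [pvCombosR] at h
            <;> simp [h]
  | cons x t ih =>
    intro k cr h
    cases k with
    | zero => simp [pvCombosR] at h; simp [h]
    | succ k' =>
      simp only [pvCombosR, List.mem_append, List.mem_map] at h
      rcases h with ⟨cr', hcr', rfl⟩ | h
      · exact (ih k' cr' hcr').trans (List.suffix_cons x t)
      · exact (ih (k' + 1) cr h).trans (List.suffix_cons x t)

theorem pvPairFold (l : List Int) (g : Int → Int) : ∀ (s : List Int) (t : List (Int × Int)),
    l.foldl (fun st3 j => (PySem.Set.add st3.1 (g j), st3.2 ++ [(g j, j)])) (s, t)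
      = (PySem.Set.update s (l.map g), t ++ l.map (fun j => (g j, j))) := by
  induction l with
  | nil => intro s t; simp [PySem.Set.update]
  | cons j l ih => intro s t; simp [List.foldl_cons, ih, PySem.Set.update, List.foldl_cons]
theorem pvInner (pf : List Int) (L : List (Int × Int)) : ∀ (s : List Int) (t : List (Int × Int)),
    L.foldl
        (fun (st2 : List Int × List (Int × Int)) e =>
          (PySem.List.pyRange (e.2 + 1) (PySem.List.len pf) 1).foldl
            (fun (st3 : List Int × List (Int × Int)) j =>
              (PySem.Set.add st3.1 (e.1 * PySem.List.pyGetD pf j 0),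
               st3.2 ++ [(e.1 * PySem.List.pyGetD pf j 0, j)]))
            st2)
        (s, t)
      = (PySem.Set.update s ((L.flatMap (pvExt pf)).map Prod.fst), t ++ L.flatMap (pvExt pf)) := by
  induction L with
  | nil => intro s t; simp [PySem.Set.update]
  | cons e L ih =>
    intro s t
    rw [List.foldl_cons,
      pvPairFold (PySem.List.pyRange (e.2 + 1) (PySem.List.len pf) 1) (fun j => e.1 * PySem.List.pyGetD pf j 0) s t,
      ih]
    simp [pvExt, PySem.Set.update, List.map_map, List.foldl_append, Function.comp_def]
theorem pvExt_eq_picks (pf : List Int) : ∀ (c d : Nat), d + c = pf.length → ∀ p : Int,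
    pvExt pf (p, (d : Int) - 1)
      = (pvPicks (pf.drop d)).map (fun xt => (p * xt.1, (pf.length : Int) - xt.2.length - 1)) := by
  intro c
  induction c with
  | zero =>
    intro d h p
    unfold pvExt
    rw [PySem.List.pyRange_one_eq_nil (by simp [PySem.List.len_eq]; omega)]
    simp [List.drop_of_length_le (by omega : pf.length ≤ d), pvPicks]
  | succ c ih =>
    intro d h p
    have hd : d < pf.length := by omega
    unfold pvExt
    have h1 : ((d : Int) - 1) + 1 = (d : Int) := by ring
    rw [h1, PySem.List.pyRange_one_cons (by simp [PySem.List.len_eq]; exact_mod_cast hd), List.map_cons]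
    rw [List.drop_eq_getElem_cons hd, pvPicks, List.map_cons]
    have hh : (p * PySem.List.pyGetD pf (d : Int) 0, (d : Int))
        = (p * pf[d], (pf.length : Int) - (pf.drop (d + 1)).length - 1) := by
      simp [PySem.List.pyGetD_natCast, List.getD_eq_getElem?_getD, List.getElem?_eq_getElem hd, List.length_drop]
      omega
    rw [hh]
    congr 1
    have h2 := ih (d + 1) (by omega) p
    unfold pvExt at h2
    have h3 : ((d : Int) + 1) = ((d + 1 : Nat) : Int) - 1 + 1 := by push_cast; ring
    rw [h3, h2]
theorem pvProd_append_singleton (c : List Int) (x : Int) : pvProd (c ++ [x]) = pvProd c * x := by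
  simp [pvProd, List.foldl_append]

theorem pvSL_eq (pf : List Int) : ∀ k, pvSL pf k = (pvCombosR pf k).map (pvToEnt pf) := by
  intro k
  induction k with
  | zero => simp [pvSL, pvCombosR, pvToEnt, pvProd]
  | succ k ih =>
    show (pvSL pf k).flatMap (pvExt pf) = _
    rw [ih, pvCombosR_succ, List.flatMap_map, List.map_flatMap]
    apply List.flatMap_congr
    intro cr hcr
    obtain ⟨pre, hpre⟩ := pvCombosR_suffix pf k cr hcr
    have hd : pf.drop pre.length = cr.2 := by rw [← hpre]; exact List.drop_left
    have hlen : pre.length + cr.2.length = pf.length := by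
      rw [← hpre, List.length_append]
    have he : pvToEnt pf cr = (pvProd cr.1, ((pre.length : Nat) : Int) - 1) := by
      unfold pvToEnt; congr 1; omega
    rw [he, pvExt_eq_picks pf cr.2.length pre.length (by omega) (pvProd cr.1), hd]
    simp [List.map_map, Function.comp_def, pvToEnt, pvProd_append_singleton]
theorem pvStepB_eq (pf : List Int) (st : List Int × List (Int × Int)) :
    pvStepB pf st
      = (PySem.Set.update st.1 ((st.2.flatMap (pvExt pf)).map Prod.fst), st.2.flatMap (pvExt pf)) := by
  rw [pvStepB, pvInner]
  simp

theorem pvLayerProds (pf : List Int) (k : Nat) :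
    (pvSL pf (k + 1)).map Prod.fst = (pvCombos pf (k + 1)).map pvProd := by
  rw [pvSL_eq, List.map_map, ← pvCombosR_fst, List.map_map]
  rfl

theorem pvBI (pf : List Int) : ∀ (c : Nat) (s : List Int),
    (List.range c).foldl (fun st (_ : Nat) => pvStepB pf st) (s, pvSL pf 0)
      = ((List.range c).foldl
            (fun f t => PySem.Set.update f ((pvCombos pf (t + 1)).map pvProd)) s,
         pvSL pf c) := by
  intro c
  induction c with
  | zero => intro s; simp
  | succ c ih =>
    intro s
    rw [List.range_succ, List.foldl_append, List.foldl_append, ih]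
    simp only [List.foldl_cons, List.foldl_nil, pvStepB_eq]
    have h2 : (pvSL pf c).flatMap (pvExt pf) = pvSL pf (c + 1) := rfl
    rw [h2, pvLayerProds]
theorem constructFactors_spec : Claim_equal_constructFactors := by
  intro n pf _
  unfold Spec_constructFactors
  have hr0 : PySem.List.pyRange 0 (PySem.List.len pf) 1
      = (List.range pf.length).map (fun k : Nat => (k : Int)) := by
    rw [PySem.List.pyRange_one]; simp [PySem.List.len_eq]
  have hr1 : PySem.List.pyRange 1 (PySem.List.len pf + 1) 1
      = (List.range pf.length).map (fun k : Nat => 1 + (k : Int)) := by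
    rw [PySem.List.pyRange_one]; simp [PySem.List.len_eq]
  have hstep : ∀ (f : List Int) (t : Nat),
      (pvCombos pf ((1 + (t : Int)).toNat)).foldl
          (fun factors combo => PySem.Set.add factors (combo.foldl (fun acc m => acc * m) 1)) f
        = PySem.Set.update f ((pvCombos pf (t + 1)).map pvProd) := by
    intro f t
    have ht : ((1 : Int) + (t : Int)).toNat = t + 1 := by omega
    rw [ht, PySem.Set.update_map_eq_foldl_add]
    rfl
  have hA : constructFactors n pf
      = (List.range pf.length).foldl
          (fun f t => PySem.Set.update f ((pvCombos pf (t + 1)).map pvProd))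
          (PySem.Set.ofList [1]) := by
    unfold constructFactors
    rw [hr1, List.foldl_map]
    simp only [hstep]
  have hB : constructFactors_alt n pf
      = ((PySem.List.pyRange 0 (PySem.List.len pf) 1).foldl
          (fun st (_ : Int) => pvStepB pf st)
          (PySem.Set.ofList [1], pvSL pf 0)).1 := rfl
  rw [hA, hB, hr0, List.foldl_map, pvBI pf pf.length (PySem.Set.ofList [1])]
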